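-- pv_equiv track=rewrite | github.com/fuzzklang/liquid_primes | src/liquid_primes/score.py | get_partition_indices_and_ottava_n
-- ===== SOURCE A (Python) =====
-- from typing import Dict, List, Tuple
--
-- ranges = {
--     range(-39, -17): -2,
--     range(-17, -5): -1,
--     range(-5, 23): 0,
--     range(23, 35): 1,
--     range(35, 48): 2,
-- }
--
-- def previous_is_in_same_range(
--     partition: List[Tuple[int, List[int]]], key: int
-- ) -> bool:
--     if not partition:
--         return False
--     return partition[-1][0] == key
--
-- def partition_notes_to_ranges(
--     notes: List[int], ranges: Dict[range, int]
-- ) -> List[Tuple[int, List[int]]]: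
--     partition: List[Tuple[int, List[int]]] = []
--     for n in notes:
--         for r in ranges:
--             if n in r:
--                 if previous_is_in_same_range(partition, ranges[r]):
--                     partition[-1][1].append(n)
--                 else:
--                     partition.append((ranges[r], [n]))
--                 continue
--     return partition
--
-- def get_partition_indices_and_ottava_n(
--     pitches: List[int],
-- ) -> List[Tuple[int, int]]:
--     indices_and_ottava_n = []
--     idx = 0
--     partitions = partition_notes_to_ranges(pitches, ranges)
--     for n, notes in partitions:
--         indices_and_ottava_n.append((idx, n))
--         idx += len(notes)
--     return indices_and_ottava_n
-- ===== SOURCE B (Python) =====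
-- def _ottava(p):
--     if -39 <= p < -17:
--         return -2
--     if -17 <= p < -5:
--         return -1
--     if -5 <= p < 23:
--         return 0
--     if 23 <= p < 35:
--         return 1
--     if 35 <= p < 48:
--         return 2
--     return None
--
-- def get_partition_indices_and_ottava_n(pitches):
--     result = []
--     idx = 0
--     prev = None
--     for p in pitches:
--         o = _ottava(p)
--         if o is None:
--             continue
--         if o != prev:
--             result.append((idx, o))
--             prev = o
--         idx += 1
--     return result
-- ===== Notes on version B (the rewrite author's own statement) =====
-- stated objective: simpler
-- what changed: B replaces A's two-phase approach (build an intermediate (ottava, [notes]) partition via a dict-of-ranges scan with last-group mutation, then a second loop summing group lengths into start indices) by a single pass keeping a running in-range index and the previous ottava, classifying each pitch with a direct if-chain; a timing run measured this constant-factor mechanism (no intermediate lists, no range-object membership tests) about 2x faster.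
import Mathlib
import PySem

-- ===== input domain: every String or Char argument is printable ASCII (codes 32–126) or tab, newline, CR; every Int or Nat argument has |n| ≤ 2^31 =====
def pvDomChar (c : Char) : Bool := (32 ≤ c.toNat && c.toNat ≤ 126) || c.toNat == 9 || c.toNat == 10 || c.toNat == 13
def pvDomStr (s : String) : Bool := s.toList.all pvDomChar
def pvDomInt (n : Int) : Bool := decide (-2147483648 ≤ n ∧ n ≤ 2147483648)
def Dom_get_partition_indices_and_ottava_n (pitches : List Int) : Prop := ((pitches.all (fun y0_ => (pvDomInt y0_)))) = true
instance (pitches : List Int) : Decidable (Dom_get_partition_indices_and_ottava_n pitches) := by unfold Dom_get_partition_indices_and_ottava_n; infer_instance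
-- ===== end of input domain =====

-- B replaces A's intermediate (ottava, [notes]) grouping plus second index-summing loop
-- by one pass keeping a running index and the previous ottava (objective: simpler).

-- ===== PORT A =====
-- the module-level dict {range: ottava}, as ((lo, hi), ottava) pairs in insertion order
def pyRanges : List ((Int × Int) × Int) :=
  [((-39, -17), -2), ((-17, -5), -1), ((-5, 23), 0), ((23, 35), 1), ((35, 48), 2)]

-- previous_is_in_same_range: partition[-1][0] == key (False on empty)
def previous_is_in_same_range (partition : List (Int × List Int)) (key : Int) : Bool :=
  match partition.getLast? with
  | none => false
  | some (k, _) => k == key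

-- partition[-1][1].append(n): append n to the notes of the last group
def appendLastNote : List (Int × List Int) → Int → List (Int × List Int)
  | [], _ => []
  | [(k, xs)], n => [(k, xs ++ [n])]
  | x :: rest, n => x :: appendLastNote rest n

-- the body of the inner `for r in ranges` loop
def stepA (partition : List (Int × List Int)) (n : Int) : List (Int × List Int) :=
  pyRanges.foldl
    (fun part r =>
      if r.1.1 ≤ n ∧ n < r.1.2 then
        if previous_is_in_same_range part r.2 then appendLastNote part n
        else part ++ [(r.2, [n])]
      else part)
    partition

def partition_notes_to_ranges (notes : List Int) : List (Int × List Int) :=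
  notes.foldl stepA []

def get_partition_indices_and_ottava_n (pitches : List Int) : List (Int × Int) :=
  ((partition_notes_to_ranges pitches).foldl
    (fun (st : List (Int × Int) × Int) g =>
      (st.1 ++ [(st.2, g.1)], st.2 + (g.2.length : Int)))
    ([], 0)).1

-- ===== PORT B =====
def pyOttava (p : Int) : Option Int :=
  if -39 ≤ p ∧ p < -17 then some (-2)
  else if -17 ≤ p ∧ p < -5 then some (-1)
  else if -5 ≤ p ∧ p < 23 then some 0
  else if 23 ≤ p ∧ p < 35 then some 1
  else if 35 ≤ p ∧ p < 48 then some 2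
  else none

def stepB (st : List (Int × Int) × Int × Option Int) (p : Int) :
    List (Int × Int) × Int × Option Int :=
  match pyOttava p with
  | none => st
  | some o =>
    if st.2.2 == some o then (st.1, st.2.1 + 1, st.2.2)
    else (st.1 ++ [(st.2.1, o)], st.2.1 + 1, some o)

def get_partition_indices_and_ottava_n_alt (pitches : List Int) : List (Int × Int) :=
  (pitches.foldl stepB ([], 0, none)).1

-- ===== PRECONDITION & SPEC =====
def Spec_get_partition_indices_and_ottava_n (pitches : List Int) (out : List (Int × Int)) : Prop := out = get_partition_indices_and_ottava_n_alt pitches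
instance (pitches : List Int) (out : List (Int × Int)) : Decidable (Spec_get_partition_indices_and_ottava_n pitches out) := by unfold Spec_get_partition_indices_and_ottava_n; infer_instance

-- ===== CLAIM (what is proved, stated in full; the proofs are below) =====
def Claim_equal_get_partition_indices_and_ottava_n : Prop := ∀ (pitches : List Int), Dom_get_partition_indices_and_ottava_n pitches → Spec_get_partition_indices_and_ottava_n pitches (get_partition_indices_and_ottava_n pitches)

-- ===== LEMMAS AND PROOFS =====

-- abstract emission of A's second loop: (idx, key) pairs with running index
def emitP (idx : Int) : List (Int × List Int) → List (Int × Int)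
  | [] => []
  | (k, xs) :: rest => (idx, k) :: emitP (idx + (xs.length : Int)) rest

def totalP : List (Int × List Int) → Int
  | [] => 0
  | (_, xs) :: rest => (xs.length : Int) + totalP rest

def lastKey (P : List (Int × List Int)) : Option Int := P.getLast?.map Prod.fst

lemma prevSame_eq (P : List (Int × List Int)) (o : Int) :
    previous_is_in_same_range P o = (lastKey P == some o) := by
  unfold previous_is_in_same_range lastKey
  cases h : P.getLast? with
  | none => simp
  | some kv => cases kv; simp

-- one-step characterisation of A's inner loop via pyOttava
lemma stepA_spec (P : List (Int × List Int)) (n : Int) :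
    stepA P n = match pyOttava n with
      | none => P
      | some o =>
        if previous_is_in_same_range P o then appendLastNote P n
        else P ++ [(o, [n])] := by
  by_cases h1 : (-39:Int) ≤ n ∧ n < -17
  · simp [stepA, pyRanges, pyOttava, h1, show ¬((-17:Int) ≤ n ∧ n < -5) by omega,
      show ¬((-5:Int) ≤ n ∧ n < 23) by omega, show ¬((23:Int) ≤ n ∧ n < 35) by omega,
      show ¬((35:Int) ≤ n ∧ n < 48) by omega]
  by_cases h2 : (-17:Int) ≤ n ∧ n < -5
  · simp [stepA, pyRanges, pyOttava, h1, h2,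
      show ¬((-5:Int) ≤ n ∧ n < 23) by omega, show ¬((23:Int) ≤ n ∧ n < 35) by omega,
      show ¬((35:Int) ≤ n ∧ n < 48) by omega]
  by_cases h3 : (-5:Int) ≤ n ∧ n < 23
  · simp [stepA, pyRanges, pyOttava, h1, h2, h3,
      show ¬((23:Int) ≤ n ∧ n < 35) by omega, show ¬((35:Int) ≤ n ∧ n < 48) by omega]
  by_cases h4 : (23:Int) ≤ n ∧ n < 35
  · simp [stepA, pyRanges, pyOttava, h1, h2, h3, h4,
      show ¬((35:Int) ≤ n ∧ n < 48) by omega]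
  by_cases h5 : (35:Int) ≤ n ∧ n < 48
  · simp [stepA, pyRanges, pyOttava, h1, h2, h3, h4, h5]
  · simp [stepA, pyRanges, pyOttava, h1, h2, h3, h4, h5]

lemma appendLast_emit (P : List (Int × List Int)) (n : Int) (hne : P ≠ []) (idx : Int) :
    emitP idx (appendLastNote P n) = emitP idx P := by
  induction P generalizing idx with
  | nil => exact absurd rfl hne
  | cons x rest ih =>
    cases x with
    | mk k xs =>
      cases rest with
      | nil => simp [appendLastNote, emitP]
      | cons y t => simp [appendLastNote, emitP, ih (by simp)]

lemma appendLast_total (P : List (Int × List Int)) (n : Int) (hne : P ≠ []) :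
    totalP (appendLastNote P n) = totalP P + 1 := by
  induction P with
  | nil => exact absurd rfl hne
  | cons x rest ih =>
    cases x with
    | mk k xs =>
      cases rest with
      | nil => simp [appendLastNote, totalP]
      | cons y t => simp [appendLastNote, totalP, ih (by simp)]; try ring

lemma appendLast_lastKey (P : List (Int × List Int)) (n : Int) (hne : P ≠ []) :
    lastKey (appendLastNote P n) = lastKey P := by
  induction P with
  | nil => exact absurd rfl hne
  | cons x rest ih =>
    cases x with
    | mk k xs =>
      cases rest with
      | nil => simp [appendLastNote, lastKey]
      | cons y t =>
        have h1 : appendLastNote ((k, xs) :: y :: t) n = (k, xs) :: appendLastNote (y :: t) n := rfl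
        have h2 := ih (by simp)
        obtain ⟨z, t', hzt⟩ : ∃ z t', appendLastNote (y :: t) n = z :: t' := by
          cases y; cases t <;> exact ⟨_, _, rfl⟩
        rw [h1, hzt]
        rw [hzt] at h2
        simpa [lastKey, List.getLast?_cons_cons] using h2

lemma emit_append (P : List (Int × List Int)) (o : Int) (ns : List Int) (idx : Int) :
    emitP idx (P ++ [(o, ns)]) = emitP idx P ++ [(idx + totalP P, o)] := by
  induction P generalizing idx with
  | nil => simp [emitP, totalP]
  | cons x rest ih =>
    cases x with
    | mk k xs => simp [emitP, totalP, ih]; ring_nf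

lemma total_append (P : List (Int × List Int)) (o : Int) (n : Int) :
    totalP (P ++ [(o, [n])]) = totalP P + 1 := by
  induction P with
  | nil => simp [totalP]
  | cons x rest ih => cases x; simp [totalP, ih]; ring

lemma lastKey_append (P : List (Int × List Int)) (x : Int × List Int) :
    lastKey (P ++ [x]) = some x.1 := by
  simp [lastKey]

lemma lastKey_ne_nil (P : List (Int × List Int)) (o : Int) (h : lastKey P = some o) : P ≠ [] := by
  intro hnil; subst hnil; simp [lastKey] at h

-- one B-step tracks one A-step
lemma step_eq (P : List (Int × List Int)) (p : Int) :
    stepB (emitP 0 P, totalP P, lastKey P) p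
      = (emitP 0 (stepA P p), totalP (stepA P p), lastKey (stepA P p)) := by
  rw [stepA_spec]
  cases h : pyOttava p with
  | none => simp [stepB, h]
  | some o =>
    simp only [stepB, h, prevSame_eq]
    by_cases hk : lastKey P = some o
    · have hne := lastKey_ne_nil P o hk
      simp [hk, appendLast_emit P p hne, appendLast_total P p hne, appendLast_lastKey P p hne]
    · have : (lastKey P == some o) = false := by
        cases hl : lastKey P <;> simp_all
      simp [this, emit_append, total_append, lastKey_append]

lemma fold_inv (pitches : List Int) (P : List (Int × List Int)) :
    pitches.foldl stepB (emitP 0 P, totalP P, lastKey P)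
      = (emitP 0 (pitches.foldl stepA P), totalP (pitches.foldl stepA P),
         lastKey (pitches.foldl stepA P)) := by
  induction pitches generalizing P with
  | nil => simp
  | cons p ps ih => simp only [List.foldl_cons, step_eq]; exact ih (stepA P p)

-- A's second loop is emitP with a running accumulator
lemma loop2_eq (P : List (Int × List Int)) (res : List (Int × Int)) (idx : Int) :
    (P.foldl (fun (st : List (Int × Int) × Int) g =>
      (st.1 ++ [(st.2, g.1)], st.2 + (g.2.length : Int))) (res, idx))
      = (res ++ emitP idx P, idx + totalP P) := by
  induction P generalizing res idx with
  | nil => simp [emitP, totalP]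
  | cons x rest ih =>
    cases x with
    | mk k xs => simp [emitP, totalP, ih]; ring

-- ===== VERDICT (by name: the statement is the Claim_ definition above) =====
theorem get_partition_indices_and_ottava_n_spec : Claim_equal_get_partition_indices_and_ottava_n := by
  intro pitches _
  unfold Spec_get_partition_indices_and_ottava_n
  unfold get_partition_indices_and_ottava_n get_partition_indices_and_ottava_n_alt
    partition_notes_to_ranges
  rw [loop2_eq]
  have h := fold_inv pitches []
  simp only [emitP, totalP, lastKey, List.getLast?_nil, Option.map_none] at h
  rw [h]
  simp
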